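-- pv_equiv track=rewrite | github.com/DimitraBrou/Tents-Trees_Project | code1/Solver.py | GroupAdjacentNumbers
-- ===== SOURCE A (Python) =====
-- def GroupAdjacentNumbers(arr): # Combine adjacent indices into the same array
--
--     len_arr = len(arr)
--     if len_arr == 0:
--         return ()
--     last = arr[0]
--     result = [
--        [last]
--     ]
--     # result += ([last], )
--     for i in range(1, len_arr):
--         current = arr[i]
--         if current == last + 1:
--             result[len(result) - 1].append(current)
--         else:
--             result.append([current])
--         last = current
--     return result
-- ===== SOURCE B (Python) =====
-- def GroupAdjacentNumbers(arr):
--     # Right-to-left scan: collect each run reversed, flush with a reversal,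
--     # then reverse the list of groups at the end.
--     if not arr:
--         return ()
--     groups = []
--     run = [arr[-1]]            # current run, stored in reverse order
--     for x in reversed(arr[:-1]):
--         if run[-1] == x + 1:
--             run.append(x)
--         else:
--             groups.append(run[::-1])
--             run = [x]
--     groups.append(run[::-1])
--     groups.reverse()
--     return groups
-- ===== Notes on version B (the rewrite author's own statement) =====
-- stated objective: alternative
-- what changed: Replaces A's left-to-right loop that mutates the last group in place (result[-1].append / result.append) with a right-to-left scan that accumulates each run in reverse and reverses runs and the group list once at the end.
import Mathlib
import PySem

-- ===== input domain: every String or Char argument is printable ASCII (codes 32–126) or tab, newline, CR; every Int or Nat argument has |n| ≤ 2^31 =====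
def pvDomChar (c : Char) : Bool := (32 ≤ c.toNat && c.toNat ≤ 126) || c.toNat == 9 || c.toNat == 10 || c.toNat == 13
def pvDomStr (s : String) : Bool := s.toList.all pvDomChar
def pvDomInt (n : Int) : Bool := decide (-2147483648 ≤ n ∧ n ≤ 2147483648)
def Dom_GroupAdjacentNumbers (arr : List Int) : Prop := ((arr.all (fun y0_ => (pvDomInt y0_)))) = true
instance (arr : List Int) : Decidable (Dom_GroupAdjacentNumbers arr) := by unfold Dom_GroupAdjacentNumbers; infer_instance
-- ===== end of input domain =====

-- B re-implements the grouping as a right-to-left scan that collects each run in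
-- reverse and reverses groups at the end, instead of A's left-to-right loop that
-- mutates the last group in place (objective: alternative, same linear cost).
-- Python's empty-input value () is ported as the empty list [].

-- ===== PORT A =====
-- result[len(result)-1].append(current)
def pvAppendLast (r : List (List Int)) (c : Int) : List (List Int) :=
  r.set (r.length - 1) ((r.getD (r.length - 1) []) ++ [c])

def pvStepA (st : List (List Int) × Int) (current : Int) : List (List Int) × Int :=
  if current = st.2 + 1 then (pvAppendLast st.1 current, current)
  else (st.1 ++ [[current]], current)

def GroupAdjacentNumbers (arr : List Int) : List (List Int) :=
  if arr.length = 0 then []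
  else
    let last := PySem.List.pyGetD arr 0 0
    let st := (PySem.List.pyRange 1 (PySem.List.len arr) 1).foldl
      (fun st i => pvStepA st (PySem.List.pyGetD arr i 0)) ([[last]], last)
    st.1

-- ===== PORT B =====
def pvStepB (st : List (List Int) × List Int) (x : Int) : List (List Int) × List Int :=
  if PySem.List.pyGetD st.2 (-1) 0 = x + 1 then (st.1, st.2 ++ [x])
  else (st.1 ++ [st.2.reverse], [x])

def GroupAdjacentNumbers_alt (arr : List Int) : List (List Int) :=
  if arr = [] then []
  else
    let st := ((PySem.List.slice arr none (some (-1))).reverse).foldl pvStepB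
      ([], [PySem.List.pyGetD arr (-1) 0])
    ((st.1 ++ [st.2.reverse]).reverse)

-- ===== PRECONDITION & SPEC =====
def Spec_GroupAdjacentNumbers (arr : List Int) (out : List (List Int)) : Prop := out = GroupAdjacentNumbers_alt arr
instance (arr : List Int) (out : List (List Int)) : Decidable (Spec_GroupAdjacentNumbers arr out) := by unfold Spec_GroupAdjacentNumbers; infer_instance

-- ===== CLAIM (what is proved, stated in full; the proofs are below) =====
def Claim_equal_GroupAdjacentNumbers : Prop := ∀ (arr : List Int), Dom_GroupAdjacentNumbers arr → Spec_GroupAdjacentNumbers arr (GroupAdjacentNumbers arr)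

-- ===== LEMMAS AND PROOFS =====

-- canonical grouping of runs of consecutive integers
def pvCan : List Int → List (List Int)
  | [] => []
  | x :: l =>
    match pvCan l with
    | [] => [[x]]
    | g :: gs => if g.headI = x + 1 then (x :: g) :: gs else [x] :: g :: gs

theorem pvCan_cons (x : Int) (l : List Int) : ∃ g gs, pvCan (x :: l) = (x :: g) :: gs := by
  cases h : pvCan l with
  | nil => exact ⟨[], [], by simp [pvCan, h]⟩
  | cons g gs =>
    by_cases hc : g.headI = x + 1
    · exact ⟨g, gs, by simp [pvCan, h, hc]⟩
    · exact ⟨[], g :: gs, by simp [pvCan, h, hc]⟩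

theorem pvAppendLast_singleton (g : List Int) (c : Int) : pvAppendLast [g] c = [g ++ [c]] := by
  simp [pvAppendLast]

theorem pvAppendLast_cons (g h : List Int) (t : List (List Int)) (c : Int) :
    pvAppendLast (g :: h :: t) c = g :: pvAppendLast (h :: t) c := by
  simp only [pvAppendLast, List.length_cons, Nat.add_sub_cancel, List.getD,
    List.getElem?_cons_succ, List.set]

theorem pvCan_cons_eq (x : Int) (l : List Int) :
    pvCan (x :: l) = match pvCan l with
      | [] => [[x]]
      | g :: gs => if g.headI = x + 1 then (x :: g) :: gs else [x] :: g :: gs := rfl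

theorem pvCan_append (l : List Int) (y : Int) (h : l ≠ []) :
    pvCan (l ++ [y]) =
      if y = l.getLast! + 1 then pvAppendLast (pvCan l) y else pvCan l ++ [[y]] := by
  induction l with
  | nil => exact absurd rfl h
  | cons a l ih =>
    cases l with
    | nil =>
      by_cases hc : y = a + 1 <;>
        simp [pvCan, pvAppendLast, List.getLast!, hc]
    | cons b t =>
      obtain ⟨g, gs, hbt⟩ := pvCan_cons b t
      have hih := ih (by simp)
      have hlast : (a :: b :: t).getLast! = (b :: t).getLast! := rfl
      rw [List.cons_append, hlast, pvCan_cons_eq, hih, pvCan_cons_eq a (b :: t), hbt]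
      by_cases hy : y = (b :: t).getLast! + 1
      · rw [if_pos hy, if_pos hy]
        cases gs with
        | nil =>
          rw [pvAppendLast_singleton]
          by_cases hab : b = a + 1 <;>
            simp [hab, pvAppendLast_singleton, pvAppendLast_cons]
        | cons h' t' =>
          rw [pvAppendLast_cons]
          by_cases hab : b = a + 1 <;>
            simp [hab, pvAppendLast_cons]
      · rw [if_neg hy, if_neg hy]
        by_cases hab : b = a + 1 <;> simp [hab]


theorem pvGetLast!_eq (l : List Int) : l.getLast! = l.getLast?.getD 0 := by
  cases l with
  | nil => rfl
  | cons a as =>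
    rw [List.getLast?_eq_some_getLast (l := a :: as) (by simp)]
    rfl

theorem pvGetLast_eq_headI_reverse (l : List Int) (h : l ≠ []) :
    l.getLast h = l.reverse.headI := by
  cases hx : l.reverse with
  | nil => exact absurd (by simpa using congrArg List.reverse hx) h
  | cons z zs =>
    have h1 : l.getLast? = some z := by
      rw [List.getLast?_eq_head?_reverse, hx]; rfl
    have h2 : l.getLast? = some (l.getLast h) := List.getLast?_eq_some_getLast h
    have := h2.symm.trans h1
    simp only [Option.some.injEq] at this
    simp [this]

theorem pvFoldA (rest : List Int) : ∀ (p : List Int), p ≠ [] →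
    (rest.foldl pvStepA (pvCan p, p.getLast!)).1 = pvCan (p ++ rest) := by
  induction rest with
  | nil => intro p _; simp
  | cons c rest ih =>
    intro p hp
    have hgl : (p ++ [c]).getLast! = c := by
      rw [pvGetLast!_eq, List.getLast?_concat]; rfl
    have hstep : pvStepA (pvCan p, p.getLast!) c = (pvCan (p ++ [c]), (p ++ [c]).getLast!) := by
      rw [pvCan_append p c hp, hgl]
      unfold pvStepA
      dsimp only
      split_ifs with hc <;> rfl
    rw [List.foldl_cons, hstep, ih (p ++ [c]) (by simp)]
    simp

theorem portA_eq_can (arr : List Int) : GroupAdjacentNumbers arr = pvCan arr := by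
  cases arr with
  | nil => simp [GroupAdjacentNumbers, pvCan]
  | cons a t =>
    unfold GroupAdjacentNumbers
    rw [if_neg (by simp)]
    simp only [PySem.List.len_eq]
    rw [PySem.List.foldl_pyRange_pyGetD' (a :: t) 0 pvStepA _ (by omega : (0:Int) ≤ 1)]
    have h0 : PySem.List.pyGetD (a :: t) 0 0 = a := PySem.List.pyGetD_zero_cons a t 0
    rw [h0]
    have hinit : (([[a]] : List (List Int)), a) = (pvCan [a], ([a] : List Int).getLast!) := rfl
    rw [hinit]
    have := pvFoldA (((a :: t).drop (1 : Int).toNat)) [a] (by simp)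
    simpa using this

theorem pvFoldB : ∀ (l : List Int), l ≠ [] →
    (((l.dropLast).reverse.foldl pvStepB ([], [l.getLast!])).2 ≠ [] ∧
      pvCan l = ((l.dropLast).reverse.foldl pvStepB ([], [l.getLast!])).2.reverse ::
        ((l.dropLast).reverse.foldl pvStepB ([], [l.getLast!])).1.reverse) := by
  intro l
  induction l with
  | nil => intro h; exact absurd rfl h
  | cons a l ih =>
    intro _
    cases l with
    | nil => simp [pvCan]
    | cons b t =>
      obtain ⟨hr, hcan⟩ := ih (by simp)
      have hlast : (a :: b :: t).getLast! = (b :: t).getLast! := rfl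
      have hdl : (a :: b :: t).dropLast.reverse = (b :: t).dropLast.reverse ++ [a] := by
        simp [List.dropLast]
      rw [hlast, hdl, List.foldl_append]
      set st := ((b :: t).dropLast.reverse.foldl pvStepB ([], [(b :: t).getLast!])) with hst
      have hget : PySem.List.pyGetD st.2 (-1) 0 = st.2.reverse.headI := by
        rw [PySem.List.pyGetD_neg_one st.2 0 hr, pvGetLast_eq_headI_reverse]
      have hstep : List.foldl pvStepB st [a] =
          if st.2.reverse.headI = a + 1 then (st.1, st.2 ++ [a])
          else (st.1 ++ [st.2.reverse], [a]) := by
        simp only [List.foldl_cons, List.foldl_nil]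
        unfold pvStepB
        rw [hget]
      rw [hstep]
      by_cases hc : st.2.reverse.headI = a + 1
      · rw [if_pos hc]
        refine ⟨by simp, ?_⟩
        rw [pvCan_cons_eq, hcan]
        simp [hc]
      · rw [if_neg hc]
        refine ⟨by simp, ?_⟩
        rw [pvCan_cons_eq, hcan]
        simp [hc]

theorem portB_eq_can (arr : List Int) : GroupAdjacentNumbers_alt arr = pvCan arr := by
  cases arr with
  | nil => simp [GroupAdjacentNumbers_alt, pvCan]
  | cons a t =>
    unfold GroupAdjacentNumbers_alt
    rw [if_neg (by simp)]
    rw [PySem.List.slice_to_neg_one]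
    have hgl : PySem.List.pyGetD (a :: t) (-1) 0 = (a :: t).getLast! := by
      rw [PySem.List.pyGetD_neg_one (a :: t) 0 (by simp), pvGetLast!_eq,
        List.getLast?_eq_some_getLast (l := a :: t) (by simp)]
      rfl
    rw [hgl]
    obtain ⟨_, hcan⟩ := pvFoldB (a :: t) (by simp)
    rw [hcan]
    simp

-- ===== VERDICT (by name: the statement is the Claim_ definition above) =====
theorem GroupAdjacentNumbers_spec : Claim_equal_GroupAdjacentNumbers := by
  intro arr _
  unfold Spec_GroupAdjacentNumbers
  rw [portA_eq_can, portB_eq_can]
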